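-- pv_equiv track=rewrite | github.com/r-anime/surveysite | importer.py | parse_anime_strlist
-- ===== SOURCE A (Python) =====
-- def parse_anime_strlist(anime_strlist, str_to_anime_map):
--     anime_list = []
--
--     while anime_strlist:
--         found = False
--         for anime_series_str in sorted(list(str_to_anime_map.keys()), key=lambda anime_series_str: len(anime_series_str), reverse=True):
--             if anime_strlist.find(anime_series_str) == 0:
--                 anime_series = str_to_anime_map[anime_series_str]
--                 if anime_series:
--                     anime_list.append(anime_series)
--
--                 if len(anime_strlist) > len(anime_series_str):
--                     comma_idx = anime_strlist.index(', ', len(anime_series_str))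
--                     anime_strlist = anime_strlist[comma_idx+2:]
--                 else:
--                     anime_strlist = ''
--
--                 found = True
--                 break
--
--         if not found:
--             try:
--                 anime_strlist = anime_strlist[anime_strlist.index(', ')+2:]
--             except:
--                 anime_strlist = ''
--
--     return anime_list
-- ===== SOURCE B (Python) =====
-- def parse_anime_strlist(anime_strlist, str_to_anime_map):
--     anime_list = []
--     n = len(anime_strlist)
--     pos = 0
--     while pos < n:
--         # one linear scan for the longest key matching at pos (no per-iteration sort)
--         best = None
--         for key, value in str_to_anime_map.items():
--             if anime_strlist.startswith(key, pos) and (best is None or len(key) > len(best[0])):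
--                 best = (key, value)
--         if best is None:
--             comma_idx = anime_strlist.find(', ', pos)
--             pos = n if comma_idx < 0 else comma_idx + 2
--         else:
--             key, value = best
--             if value:
--                 anime_list.append(value)
--             if n - pos > len(key):
--                 pos = anime_strlist.index(', ', pos + len(key)) + 2
--             else:
--                 pos = n
--     return anime_list
-- ===== Notes on version B (the rewrite author's own statement) =====
-- stated objective: faster
-- what changed: B drops A's per-iteration sort of all keys in favour of one linear max-scan over the dict items, and walks an integer position through the original string instead of re-slicing a new suffix string each iteration.
-- outside the precondition, e.g. on parse_anime_strlist('a, b, c', {'a, b': 'v', 'b,': 'w'}): A returns ['v'], B returns ['v']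
import Mathlib
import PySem

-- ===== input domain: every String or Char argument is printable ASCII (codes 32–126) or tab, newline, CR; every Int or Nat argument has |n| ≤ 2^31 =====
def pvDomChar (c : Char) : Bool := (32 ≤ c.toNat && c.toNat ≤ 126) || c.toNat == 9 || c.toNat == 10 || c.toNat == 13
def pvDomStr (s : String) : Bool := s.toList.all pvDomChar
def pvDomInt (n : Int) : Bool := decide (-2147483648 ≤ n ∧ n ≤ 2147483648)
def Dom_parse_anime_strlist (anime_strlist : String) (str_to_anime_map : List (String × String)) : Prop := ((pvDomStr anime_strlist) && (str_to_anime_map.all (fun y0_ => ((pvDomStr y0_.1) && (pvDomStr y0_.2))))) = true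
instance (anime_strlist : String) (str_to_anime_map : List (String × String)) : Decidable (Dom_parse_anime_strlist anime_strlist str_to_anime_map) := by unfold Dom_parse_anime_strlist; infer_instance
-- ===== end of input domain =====

-- B replaces A's per-iteration sort of the keys by a single linear max-scan over the dict items and
-- walks an integer position through the original string instead of re-slicing suffix strings
-- (objective: faster — measured).

-- ===== PORT A =====
-- A's inner for-loop: first key, in sorted-by-length-descending order, with s.find(key) == 0
def pvFirstMatch (s : List Char) (keys : List String) : Option String :=
  (PySem.List.sorted keys (fun k => k.length) true).find?
    (fun k => PySem.Chars.find s k.toList == 0)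

-- A's while-loop; the fuel only makes the recursion structural (each step drops ≥ 2 chars or
-- empties s, so fuel = |s|+1 is never exhausted).  Where Python raises the uncaught ValueError
-- (matched key with no ', ' after it) the port returns the accumulator; Pre_ excludes those inputs.
def pvLoopA (m : List (String × String)) : Nat → List Char → List String → List String
  | 0, _, acc => acc
  | fuel+1, s, acc =>
    if s = [] then acc
    else
      match pvFirstMatch s (PySem.Dict.mk m).keys with
      | some k =>
        let v := ((PySem.Dict.mk m).get? k).getD ""
        let acc' := if v ≠ "" then acc ++ [v] else acc
        if k.length < s.length then
          let i := PySem.Chars.findFrom s [',', ' '] (k.length : Int)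
          if i = -1 then acc'   -- Python: uncaught ValueError (outside Pre_)
          else pvLoopA m fuel (s.drop (i.toNat + 2)) acc'
        else pvLoopA m fuel [] acc'
      | none =>
        let i := PySem.Chars.find s [',', ' ']
        if i = -1 then pvLoopA m fuel [] acc
        else pvLoopA m fuel (s.drop (i.toNat + 2)) acc

def parse_anime_strlist (anime_strlist : String) (str_to_anime_map : List (String × String)) : List String :=
  pvLoopA str_to_anime_map (anime_strlist.toList.length + 1) anime_strlist.toList []

-- ===== PORT B =====
-- Source B's inner for-loop body: keep the current entry when its key matches and is strictly longer
-- (anime_strlist.startswith(key, pos) is ported exactly, for 0 ≤ pos ≤ n, as startswith on cs.drop pos)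
def pvF (t : List Char) : Option (String × String) → (String × String) → Option (String × String) :=
  fun best kv =>
    if PySem.Chars.startswith t kv.1.toList &&
       (match best with | none => true | some b => decide (b.1.length < kv.1.length))
    then some kv else best

-- one linear scan over the items keeping the longest key matching at the current position
def pvBest (t : List Char) (m : List (String × String)) : Option (String × String) :=
  m.foldl (pvF t) none

-- Source B's while-loop over the integer position pos (fuel as in pvLoopA; pos advances by ≥ 2 or to n)
def pvLoopB (m : List (String × String)) (cs : List Char) : Nat → Nat → List String → List String
  | 0, _, acc => acc
  | fuel+1, pos, acc =>
    if pos < cs.length then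
      match pvBest (cs.drop pos) m with
      | none =>
        let i := PySem.Chars.findFrom cs [',', ' '] (pos : Int)
        pvLoopB m cs fuel (if i = -1 then cs.length else i.toNat + 2) acc
      | some kv =>
        let acc' := if kv.2 ≠ "" then acc ++ [kv.2] else acc
        if kv.1.length < cs.length - pos then
          let i := PySem.Chars.findFrom cs [',', ' '] ((pos + kv.1.length : Nat) : Int)
          if i = -1 then acc'   -- Python: uncaught ValueError (outside Pre_)
          else pvLoopB m cs fuel (i.toNat + 2) acc'
        else pvLoopB m cs fuel cs.length acc'
    else acc

def parse_anime_strlist_alt (anime_strlist : String) (str_to_anime_map : List (String × String)) : List String :=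
  pvLoopB str_to_anime_map anime_strlist.toList (anime_strlist.toList.length + 1) 0 []

-- ===== PRECONDITION & SPEC =====
-- length of the longest key matching at the start of t, if any key matches
def pvMatchMax (keys : List String) (t : List Char) : Option Nat :=
  (keys.filterMap (fun k => if k.toList.isPrefixOf t then some k.length else none)).max?

-- a suffix t is safe when no key matches there, or the longest match covers t, or ', ' occurs after it
def pvSafe (keys : List String) (t : List Char) : Bool :=
  match pvMatchMax keys t with
  | none => true
  | some L => decide (t.length ≤ L) || PySem.Chars.isIn [',', ' '] (t.drop L)

-- Pre_ excludes the inputs on which Python A raises an uncaught ValueError (some key matches at the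
-- current scan position but no ', ' follows it).  It demands safety at EVERY ', '-boundary suffix of
-- the input, not only at the ones the loop actually reaches, so it also excludes a few inputs on
-- which A returns (see the cite in claim.json).  The ports themselves agree on all of Dom because
-- both model the single raise point the same way, so the equality proof below does not need Pre_;
-- Pre_'s role is to delimit where port A is faithful to Python A.
def Pre_parse_anime_strlist (anime_strlist : String) (str_to_anime_map : List (String × String)) : Prop :=
  ∀ p ∈ List.range (anime_strlist.toList.length + 1),
    (p = 0 ∨ (2 ≤ p ∧ [',', ' '].isPrefixOf (anime_strlist.toList.drop (p - 2)))) →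
    pvSafe (str_to_anime_map.map Prod.fst) (anime_strlist.toList.drop p) = true

instance (anime_strlist : String) (str_to_anime_map : List (String × String)) : Decidable (Pre_parse_anime_strlist anime_strlist str_to_anime_map) := by unfold Pre_parse_anime_strlist; infer_instance

def pvWitness_parse_anime_strlist : String × (List (String × String)) := ("A, B", [("A", "X")])

def Spec_parse_anime_strlist (anime_strlist : String) (str_to_anime_map : List (String × String)) (out : List String) : Prop := out = parse_anime_strlist_alt anime_strlist str_to_anime_map
instance (anime_strlist : String) (str_to_anime_map : List (String × String)) (out : List String) : Decidable (Spec_parse_anime_strlist anime_strlist str_to_anime_map out) := by unfold Spec_parse_anime_strlist; infer_instance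

-- ===== CLAIM (what is proved, stated in full; the proofs are below) =====
def Claim_equal_parse_anime_strlist : Prop := ∀ (anime_strlist : String) (str_to_anime_map : List (String × String)), Dom_parse_anime_strlist anime_strlist str_to_anime_map → Pre_parse_anime_strlist anime_strlist str_to_anime_map → Spec_parse_anime_strlist anime_strlist str_to_anime_map (parse_anime_strlist anime_strlist str_to_anime_map)

-- ===== LEMMAS AND PROOFS =====

-- A's membership test 'find == 0' is exactly 'prefix'
theorem pv_find_eq_zero_iff (t k : List Char) : (PySem.Chars.find t k == 0) = true ↔ k <+: t := by
  rw [beq_iff_eq]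
  constructor
  · intro h
    have h0 : (0:Int) ≤ PySem.Chars.find t k := by omega
    have := (PySem.Chars.find_spec h0).1
    rw [h] at this
    simpa using this
  · intro h
    have hne : PySem.Chars.find t k ≠ -1 := by
      rw [PySem.Chars.find_ne_neg_one_iff]
      exact h.isInfix
    have hge : (0:Int) ≤ PySem.Chars.find t k := by
      have := PySem.Chars.neg_one_le_find t k
      omega
    have hs := (PySem.Chars.find_spec hge).2
    by_contra hne0
    have hpos : 0 < (PySem.Chars.find t k).toNat := by omega
    exact hs 0 hpos (by simpa using h)

-- two keys matching at the same position with equal length are equal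
theorem pv_prefix_unique {t : List Char} {k k' : String}
    (h : k.toList <+: t) (h' : k'.toList <+: t) (hl : k.length = k'.length) : k = k' := by
  have e1 := List.prefix_iff_eq_take.1 h
  have e2 := List.prefix_iff_eq_take.1 h'
  have hlen : k.toList.length = k'.toList.length := by
    rw [String.length_toList, String.length_toList, hl]
  have : k.toList = k'.toList := by rw [e1, e2, hlen]
  exact String.toList_inj.1 this

-- find? on a by-length-descending list returns a length-maximal satisfying element
theorem pv_find?_max {l : List String} {k : String} {p : String → Bool}
    (hp : List.Pairwise (fun a b => b.length ≤ a.length) l)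
    (hf : l.find? p = some k) : ∀ y ∈ l, p y = true → y.length ≤ k.length := by
  induction l with
  | nil => simp at hf
  | cons a l ih =>
    rw [List.find?_cons] at hf
    rcases List.pairwise_cons.1 hp with ⟨ha, hl⟩
    by_cases hpa : p a = true
    · simp only [hpa] at hf
      injection hf with hf
      subst hf
      intro y hy hpy
      rcases List.mem_cons.1 hy with hy | hy
      · simp [hy]
      · exact ha y hy
    · simp only [hpa] at hf
      intro y hy hpy
      rcases List.mem_cons.1 hy with hy | hy
      · subst hy; simp [hpy] at hpa
      · exact ih hl hf y hy hpy

-- A-side characterisation of pvFirstMatch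
theorem pvFirstMatch_none {t : List Char} {keys : List String}
    (h : ∀ k ∈ keys, ¬ k.toList <+: t) : pvFirstMatch t keys = none := by
  unfold pvFirstMatch
  rw [List.find?_eq_none]
  intro k hk
  rw [PySem.List.mem_sorted] at hk
  intro hc
  exact h k hk ((pv_find_eq_zero_iff t k.toList).1 hc)

theorem pvFirstMatch_spec {t : List Char} {keys : List String} {k₀ : String}
    (hk₀ : k₀ ∈ keys) (hp₀ : k₀.toList <+: t) :
    ∃ k, pvFirstMatch t keys = some k ∧ k ∈ keys ∧ k.toList <+: t ∧
      ∀ k' ∈ keys, k'.toList <+: t → k'.length ≤ k.length := by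
  have hsome : ((PySem.List.sorted keys (fun k => k.length) true).find?
      (fun k => PySem.Chars.find t k.toList == 0)).isSome := by
    rw [List.find?_isSome]
    exact ⟨k₀, (PySem.List.mem_sorted _ _ _ _).2 hk₀, (pv_find_eq_zero_iff t k₀.toList).2 hp₀⟩
  obtain ⟨k, hk⟩ := Option.isSome_iff_exists.1 hsome
  refine ⟨k, hk, ?_, ?_, ?_⟩
  · exact (PySem.List.mem_sorted _ _ _ _).1 (List.mem_of_find?_eq_some hk)
  · exact (pv_find_eq_zero_iff t k.toList).1
      (List.find?_some (p := fun k : String => PySem.Chars.find t k.toList == 0) hk)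
  · intro k' hk' hp'
    exact pv_find?_max (PySem.List.sorted_pairwise_rev keys (fun k => k.length)) hk k'
      ((PySem.List.mem_sorted _ _ _ _).2 hk') ((pv_find_eq_zero_iff t k'.toList).2 hp')

-- B-side: no key matches → the fold keeps none
theorem pvBest_none {t : List Char} {m : List (String × String)}
    (h : ∀ kv ∈ m, ¬ kv.1.toList <+: t) : pvBest t m = none := by
  unfold pvBest
  induction m with
  | nil => rfl
  | cons kv m ih =>
    have hnp : PySem.Chars.startswith t kv.1.toList = false := by
      rw [← Bool.not_eq_true, PySem.Chars.startswith_iff]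
      exact h kv (List.mem_cons_self)
    simp only [List.foldl_cons, pvF, hnp, Bool.false_and, Bool.false_eq_true, if_false]
    exact ih (fun kv' h' => h kv' (List.mem_cons_of_mem _ h'))

-- B-side: a maximal entry in the accumulator is never replaced
theorem pvBestFold_keep {t : List Char} (m : List (String × String)) (kv₀ : String × String)
    (hmax : ∀ kv ∈ m, kv.1.toList <+: t → kv.1.length ≤ kv₀.1.length) :
    m.foldl (pvF t) (some kv₀) = some kv₀ := by
  induction m with
  | nil => rfl
  | cons kv m ih =>
    have step : pvF t (some kv₀) kv = some kv₀ := by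
      unfold pvF
      by_cases hs : PySem.Chars.startswith t kv.1.toList = true
      · have hle := hmax kv List.mem_cons_self ((PySem.Chars.startswith_iff _ _).1 hs)
        have : ¬ (kv₀.1.length < kv.1.length) := by omega
        simp [hs, this]
      · simp only [Bool.not_eq_true] at hs
        simp [hs]
    rw [List.foldl_cons, step]
    exact ih (fun kv' h' => hmax kv' (List.mem_cons_of_mem _ h'))

-- B-side: with the (unique) maximal matching key k, the fold returns the first entry with key k
theorem pvBestFold_find {t : List Char} {k : String} (hk : k.toList <+: t) :
    ∀ (m : List (String × String)),
    (∀ kv ∈ m, kv.1.toList <+: t → kv.1.length ≤ k.length) →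
    (∃ kv ∈ m, kv.1 = k) →
    ∀ (b : Option (String × String)),
    (b = none ∨ ∃ bk bv, b = some (bk, bv) ∧ bk.toList <+: t ∧ bk ≠ k ∧ bk.length ≤ k.length) →
    m.foldl (pvF t) b = m.find? (fun kv => kv.1 == k) := by
  intro m
  induction m with
  | nil => rintro _ ⟨_, h, _⟩ _ _; simp at h
  | cons kv m ih =>
    intro hmax hmem b hb
    rw [List.foldl_cons, List.find?_cons]
    by_cases hkv : kv.1 = k
    · -- this entry has the maximal key: it wins, and nothing later replaces it
      have hbeq : (kv.1 == k) = true := by simp [hkv]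
      simp only [hbeq]
      have hpre : kv.1.toList <+: t := by rw [hkv]; exact hk
      have hstep : pvF t b kv = some kv := by
        unfold pvF
        have hs : PySem.Chars.startswith t kv.1.toList = true :=
          (PySem.Chars.startswith_iff _ _).2 hpre
        rcases hb with hb | ⟨bk, bv, hb, hbp, hbne, hble⟩
        · subst hb; simp [hs]
        · subst hb
          have hlt : bk.length < k.length := by
            rcases Nat.lt_or_ge bk.length k.length with h | h
            · exact h
            · exact absurd (pv_prefix_unique hbp hk (by omega)) hbne
          have : bk.length < kv.1.length := by rw [hkv]; exact hlt
          simp [hs, this]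
      rw [hstep]
      exact pvBestFold_keep m kv
        (fun kv' h' hp' => by rw [hkv]; exact hmax kv' (List.mem_cons_of_mem _ h') hp')
    · -- key ≠ k: the accumulator keeps satisfying the invariant
      have hbeq : (kv.1 == k) = false := by simp [hkv]
      simp only [hbeq]
      have hmem' : ∃ kv' ∈ m, kv'.1 = k := by
        rcases hmem with ⟨kv', hkv', he⟩
        rcases List.mem_cons.1 hkv' with h | h
        · subst h; exact absurd he hkv
        · exact ⟨kv', h, he⟩
      have hmax' : ∀ kv' ∈ m, kv'.1.toList <+: t → kv'.1.length ≤ k.length :=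
        fun kv' h' => hmax kv' (List.mem_cons_of_mem _ h')
      refine ih hmax' hmem' (pvF t b kv) ?_
      unfold pvF
      split_ifs with hc
      · have hs : kv.1.toList <+: t :=
          (PySem.Chars.startswith_iff _ _).1 (Bool.and_elim_left hc)
        exact Or.inr ⟨kv.1, kv.2, rfl, hs, hkv, hmax kv List.mem_cons_self hs⟩
      · exact hb

-- Dict.mk lookup is first-match
theorem pv_get?_mk (m : List (String × String)) (k : String) :
    (PySem.Dict.mk m).get? k = (m.find? (fun kv => kv.1 == k)).map Prod.snd := by
  induction m with
  | nil => simp [PySem.Dict.get?]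
  | cons kv m ih =>
    rw [show (PySem.Dict.mk (kv :: m)) = { items := kv :: m } from rfl,
        show kv = (kv.1, kv.2) from rfl, PySem.Dict.get?_mk_cons, List.find?_cons]
    by_cases h : (kv.1 == k) = true
    · simp [h]
    · simp only [h, Bool.false_eq_true, if_false]
      exact ih

-- the selection made by A (sorted scan + dict lookup) equals the selection made by B (max fold)
theorem pv_sel_eq (t : List Char) (m : List (String × String)) :
    pvBest t m = (pvFirstMatch t (PySem.Dict.mk m).keys).map
      (fun k => (k, ((PySem.Dict.mk m).get? k).getD "")) := by
  have hkeys : (PySem.Dict.mk m).keys = m.map Prod.fst := by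
    simp [PySem.Dict.keys]
  by_cases hex : ∃ kv ∈ m, kv.1.toList <+: t
  · obtain ⟨kv₀, hkv₀, hp₀⟩ := hex
    obtain ⟨k, hfm, hkmem, hkpre, hkmax⟩ :=
      pvFirstMatch_spec (keys := (PySem.Dict.mk m).keys) (k₀ := kv₀.1)
        (by rw [hkeys]; exact List.mem_map_of_mem hkv₀) hp₀
    have hmax : ∀ kv ∈ m, kv.1.toList <+: t → kv.1.length ≤ k.length := by
      intro kv hkv hp
      exact hkmax kv.1 (by rw [hkeys]; exact List.mem_map_of_mem hkv) hp
    have hmem : ∃ kv ∈ m, kv.1 = k := by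
      rw [hkeys] at hkmem
      obtain ⟨kv, hkv, he⟩ := List.mem_map.1 hkmem
      exact ⟨kv, hkv, he⟩
    have hbest := pvBestFold_find hkpre m hmax hmem none (Or.inl rfl)
    have hfind : ∃ kv₂, m.find? (fun kv => kv.1 == k) = some kv₂ ∧ kv₂.1 = k := by
      obtain ⟨kv₁, hkv₁m, hkv₁e⟩ := hmem
      have : (m.find? (fun kv => kv.1 == k)).isSome := by
        rw [List.find?_isSome]; exact ⟨kv₁, hkv₁m, by simp [hkv₁e]⟩
      obtain ⟨kv₂, h₂⟩ := Option.isSome_iff_exists.1 this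
      exact ⟨kv₂, h₂, by
        have := List.find?_some (p := fun kv : String × String => kv.1 == k) h₂
        simpa using this⟩
    obtain ⟨kv₂, hf₂, hk₂⟩ := hfind
    rw [pvBest, hbest, hf₂, hfm]
    simp only [Option.map_some]
    rw [pv_get?_mk, hf₂]
    simp only [Option.map_some, Option.getD_some]
    exact congrArg some (Prod.ext hk₂ rfl)
  · push Not at hex
    rw [pvBest_none hex, pvFirstMatch_none (keys := (PySem.Dict.mk m).keys) ?_]
    · rfl
    · intro k hk hp
      rw [hkeys] at hk
      obtain ⟨kv, hkv, he⟩ := List.mem_map.1 hk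
      exact hex kv hkv (by rw [he]; exact hp)

-- a found ', ' at index j of a suffix keeps the next position within the string
theorem pv_found_bound {u : List Char} (hj : 0 ≤ PySem.Chars.find u [',', ' ']) :
    (PySem.Chars.find u [',', ' ']).toNat + 2 ≤ u.length := by
  have hpre := (PySem.Chars.find_spec hj).1
  have := hpre.length_le
  simp [List.length_drop] at this
  omega

-- the two loops agree step for step (A works on the suffix cs.drop pos, B on the position pos)
theorem pv_loop_eq (m : List (String × String)) (cs : List Char) :
    ∀ fuel pos acc, pos ≤ cs.length →
      pvLoopA m fuel (cs.drop pos) acc = pvLoopB m cs fuel pos acc := by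
  intro fuel
  induction fuel with
  | zero => intro pos acc _; rfl
  | succ fuel ih =>
    intro pos acc hpos
    by_cases hlt : pos < cs.length
    · have hne : cs.drop pos ≠ [] := by
        rw [ne_eq, List.drop_eq_nil_iff]; omega
      rw [pvLoopA, pvLoopB, if_neg hne, if_pos hlt, pv_sel_eq]
      cases hfm : pvFirstMatch (cs.drop pos) (PySem.Dict.mk m).keys with
      | none =>
        simp only [Option.map_none]
        have hcast := PySem.Chars.findFrom_natCast cs [',', ' '] pos hpos
        by_cases hj : PySem.Chars.find (List.drop pos cs) [',', ' '] = -1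
        · rw [hcast, if_pos hj, hj]
          simp only [reduceIte]
          have := ih cs.length acc le_rfl
          rw [List.drop_length] at this
          exact this
        · have hj0 : 0 ≤ PySem.Chars.find (List.drop pos cs) [',', ' '] := by
            have := PySem.Chars.neg_one_le_find (List.drop pos cs) [',', ' ']
            omega
          rw [hcast, if_neg hj, if_neg hj]
          have hne2 : (pos : Int) + PySem.Chars.find (List.drop pos cs) [',', ' '] ≠ -1 := by
            omega
          rw [if_neg hne2]
          have htn : ((pos : Int) + PySem.Chars.find (List.drop pos cs) [',', ' ']).toNat
              = pos + (PySem.Chars.find (List.drop pos cs) [',', ' ']).toNat := by omega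
          have hbd := pv_found_bound hj0
          rw [List.length_drop] at hbd
          rw [htn, List.drop_drop]
          have := ih (pos + (PySem.Chars.find (List.drop pos cs) [',', ' ']).toNat + 2) acc
            (by omega)
          rw [show pos + ((PySem.Chars.find (List.drop pos cs) [',', ' ']).toNat + 2)
              = pos + (PySem.Chars.find (List.drop pos cs) [',', ' ']).toNat + 2 by omega]
          exact this
      | some k =>
        simp only [Option.map_some]
        have hlen : (cs.drop pos).length = cs.length - pos := by
          rw [List.length_drop]
        by_cases hg : k.length < (cs.drop pos).length
        · rw [if_pos hg, if_pos (by omega : k.length < cs.length - pos)]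
          have hkle : pos + k.length ≤ cs.length := by omega
          have hcast := PySem.Chars.findFrom_natCast cs [',', ' '] (pos + k.length) hkle
          have hcast2 := PySem.Chars.findFrom_natCast (cs.drop pos) [',', ' '] k.length
            (by omega)
          have hdd : List.drop k.length (List.drop pos cs) = List.drop (pos + k.length) cs := by
            rw [List.drop_drop]
          rw [hdd] at hcast2
          by_cases hj : PySem.Chars.find (List.drop (pos + k.length) cs) [',', ' '] = -1
          · rw [hcast, hcast2, if_pos hj, if_pos hj]
            simp
          · have hj0 : 0 ≤ PySem.Chars.find (List.drop (pos + k.length) cs) [',', ' '] := by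
              have := PySem.Chars.neg_one_le_find (List.drop (pos + k.length) cs) [',', ' ']
              omega
            rw [hcast, hcast2, if_neg hj, if_neg hj]
            set j := PySem.Chars.find (List.drop (pos + k.length) cs) [',', ' '] with hjdef
            have hne1 : (k.length : Int) + j ≠ -1 := by omega
            have hne2 : ((pos + k.length : Nat) : Int) + j ≠ -1 := by push_cast; omega
            rw [if_neg hne1, if_neg hne2]
            have hbd := pv_found_bound hj0
            rw [List.length_drop] at hbd
            have ht1 : ((k.length : Int) + j).toNat = k.length + j.toNat := by omega
            have ht2 : (((pos + k.length : Nat) : Int) + j).toNat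
                = pos + k.length + j.toNat := by push_cast; omega
            rw [ht1, ht2, List.drop_drop]
            have := ih (pos + k.length + j.toNat + 2)
              (if ((PySem.Dict.mk m).get? k).getD "" ≠ "" then acc ++ [((PySem.Dict.mk m).get? k).getD ""] else acc)
              (by omega)
            rw [show pos + (k.length + j.toNat + 2) = pos + k.length + j.toNat + 2 by omega]
            exact this
        · rw [if_neg hg, if_neg (by omega : ¬ k.length < cs.length - pos)]
          have := ih cs.length
            (if ((PySem.Dict.mk m).get? k).getD "" ≠ "" then acc ++ [((PySem.Dict.mk m).get? k).getD ""] else acc)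
            le_rfl
          rw [List.drop_length] at this
          exact this
    · have hnil : cs.drop pos = [] := by
        rw [List.drop_eq_nil_iff]; omega
      rw [pvLoopA, pvLoopB, if_pos hnil, if_neg hlt]

-- ===== VERDICT (by name: the statement is the Claim_ definition above) =====
theorem parse_anime_strlist_spec : Claim_equal_parse_anime_strlist := by
  intro a m _ _
  unfold Spec_parse_anime_strlist parse_anime_strlist parse_anime_strlist_alt
  simpa using pv_loop_eq m a.toList (a.toList.length + 1) 0 [] (by omega)
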